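-- pv_equiv track=rewrite | github.com/nixawk/hello-python2 | misc/pattern/pattern.py | converge_sets
-- ===== SOURCE A (Python) =====
-- def converge_sets(sets, idx, offsets, length):
--     """https://github.com/rapid7/rex-text/blob/master/lib/rex/text.rb
--     """
--     buf = sets[idx][offsets[idx]]
--
--     if ((idx + 1) < len(sets)) and (sets[idx + 1]):
--         buf += converge_sets(sets, idx + 1, offsets, length)
--     else:
--         offsets[idx] = (offsets[idx] + 1) % len(sets[idx])
--         while (idx >= 0 and offsets[idx] == 0):
--             idx -= 1
--             offsets[idx] = (offsets[idx] + 1) % len(sets[idx])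
--
--         if (idx < 0):
--             return buf
--
--     return buf
-- ===== SOURCE B (Python) =====
-- def converge_sets(sets, idx, offsets, length):
--     # Two staged passes instead of A's recursion: first locate the bottom index j
--     # of the walk, then build the product string in one shot as a join over
--     # range(idx, j+1); finally do the same in-place odometer carry as A.
--     j = idx
--     while (j + 1) < len(sets) and sets[j + 1]:
--         j += 1
--     buf = "".join(sets[k][offsets[k]] for k in range(idx, j + 1))
--     offsets[j] = (offsets[j] + 1) % len(sets[j])
--     while j >= 0 and offsets[j] == 0:
--         j -= 1
--         offsets[j] = (offsets[j] + 1) % len(sets[j])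
--     return buf
-- ===== Notes on version B (the rewrite author's own statement) =====
-- stated objective: alternative
-- what changed: Replaces A's linear recursion (each level appends the recursive result for the rest of the sets) with two staged passes: a scan that only finds the bottom index j, then a single join over a range(idx, j+1) comprehension that reads all the characters, then the same in-place odometer carry.
-- outside the precondition, e.g. on converge_sets([['a', 'b'], []], 0, [0, 0], 0): A returns 'a', B returns 'a'; on converge_sets([['a'], ['b']], -1, [0, 0, 0], 0): A returns 'bab', B returns 'bab'
import Mathlib
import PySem

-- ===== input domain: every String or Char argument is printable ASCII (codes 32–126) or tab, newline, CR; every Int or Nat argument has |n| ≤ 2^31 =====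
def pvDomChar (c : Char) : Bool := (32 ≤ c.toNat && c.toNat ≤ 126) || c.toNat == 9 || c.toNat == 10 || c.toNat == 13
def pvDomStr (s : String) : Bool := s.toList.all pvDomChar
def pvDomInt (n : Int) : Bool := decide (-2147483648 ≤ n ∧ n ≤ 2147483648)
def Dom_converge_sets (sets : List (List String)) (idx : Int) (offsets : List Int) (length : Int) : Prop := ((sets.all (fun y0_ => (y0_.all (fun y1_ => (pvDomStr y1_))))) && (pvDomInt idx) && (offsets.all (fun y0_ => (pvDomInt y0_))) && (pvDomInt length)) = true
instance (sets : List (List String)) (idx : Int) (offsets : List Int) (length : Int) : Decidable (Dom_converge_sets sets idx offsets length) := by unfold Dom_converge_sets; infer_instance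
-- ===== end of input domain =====

-- B replaces A's linear recursion by two staged passes (find the bottom index, then
-- join the characters over a range); equivalence is about the RETURN value only —
-- both Pythons also mutate `offsets` in place (identically), which the ports omit.

-- ===== PORT A =====
-- A: read sets[idx][offsets[idx]], recurse on idx+1 while the next set exists and is
-- nonempty; fuel = (len(sets) - idx).toNat bounds the recursion (the path ends at
-- len(sets)-1; the fuel-0 branch is unreachable on Pre_ inputs).  The in-place odometer
-- update of `offsets` does not contribute to the returned string and is not modelled.
def convergeRecA (sets : List (List String)) (offsets : List Int) : Nat → Int → String
  | fuel, idx =>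
    let buf := PySem.List.pyGetD (PySem.List.pyGetD sets idx []) (PySem.List.pyGetD offsets idx 0) ""
    if idx + 1 < (sets.length : Int) ∧ PySem.List.pyGetD sets (idx + 1) [] ≠ [] then
      match fuel with
      | 0 => buf
      | f + 1 => buf ++ convergeRecA sets offsets f (idx + 1)
    else buf

def converge_sets (sets : List (List String)) (idx : Int) (offsets : List Int) (length : Int) : String :=
  convergeRecA sets offsets ((sets.length : Int) - idx).toNat idx

-- ===== PORT B =====
-- B, pass 1: while (j+1) < len(sets) and sets[j+1]: j += 1  — a pure scan for the
-- bottom index, fuel-bounded like A's recursion.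
def pvFindEnd (sets : List (List String)) : Nat → Int → Int
  | fuel, j =>
    if j + 1 < (sets.length : Int) ∧ PySem.List.pyGetD sets (j + 1) [] ≠ [] then
      match fuel with
      | 0 => j
      | f + 1 => pvFindEnd sets f (j + 1)
    else j

-- B, pass 2: "".join(sets[k][offsets[k]] for k in range(idx, j + 1)).
-- Source B's odometer carry loop only mutates `offsets` and is not modelled.
def converge_sets_alt (sets : List (List String)) (idx : Int) (offsets : List Int) (length : Int) : String :=
  let j := pvFindEnd sets ((sets.length : Int) - idx).toNat idx
  PySem.Str.join "" ((PySem.List.pyRange idx (j + 1) 1).map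
    (fun k => PySem.List.pyGetD (PySem.List.pyGetD sets k []) (PySem.List.pyGetD offsets k 0) ""))

-- ===== PRECONDITION & SPEC =====
-- Pre_ is the natural domain: a valid (possibly negative) Python index idx into a
-- nonempty list of nonempty sets, offsets at least as long as sets (equal when idx
-- is negative, since then Python's wraparound pairs them from the end), and an
-- in-range (possibly negative) offset at every position the walk can visit; outside
-- it A raises (IndexError, or ZeroDivisionError in the carry loop) or returns only
-- by accident of a malformed shape (an empty set or extra offsets entries at
-- positions the walk happens not to visit).
def Pre_converge_sets (sets : List (List String)) (idx : Int) (offsets : List Int) (length : Int) : Prop :=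
  sets ≠ [] ∧ (∀ l ∈ sets, l ≠ []) ∧
  -(sets.length : Int) ≤ idx ∧ idx < (sets.length : Int) ∧
  sets.length ≤ offsets.length ∧ (idx < 0 → offsets.length = sets.length) ∧
  (∀ i : Nat, i < sets.length → idx ≤ (i : Int) →
    -(((sets.getD i []).length : Int)) ≤ offsets.getD i 0 ∧
      offsets.getD i 0 < ((sets.getD i []).length : Int))
instance (sets : List (List String)) (idx : Int) (offsets : List Int) (length : Int) : Decidable (Pre_converge_sets sets idx offsets length) := by unfold Pre_converge_sets; infer_instance

def pvWitness_converge_sets : List (List String) × Int × List Int × Int := ([["a", "b"], ["c"]], 0, [0, 0], 0)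

def Spec_converge_sets (sets : List (List String)) (idx : Int) (offsets : List Int) (length : Int) (out : String) : Prop := out = converge_sets_alt sets idx offsets length
instance (sets : List (List String)) (idx : Int) (offsets : List Int) (length : Int) (out : String) : Decidable (Spec_converge_sets sets idx offsets length out) := by unfold Spec_converge_sets; infer_instance

-- ===== CLAIM (what is proved, stated in full; the proofs are below) =====
def Claim_equal_converge_sets : Prop := ∀ (sets : List (List String)) (idx : Int) (offsets : List Int) (length : Int), Dom_converge_sets sets idx offsets length → Pre_converge_sets sets idx offsets length → Spec_converge_sets sets idx offsets length (converge_sets sets idx offsets length)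

-- ===== LEMMAS AND PROOFS =====

theorem join_empty_cons (x : String) (xs : List String) :
    PySem.Str.join "" (x :: xs) = x ++ PySem.Str.join "" xs := by
  simp [PySem.Str.join, PySem.Chars.join]
  cases xs with
  | nil => simp [List.intercalate]
  | cons y ys => simp [List.intercalate]

theorem join_empty_singleton (x : String) : PySem.Str.join "" [x] = x := by
  simp [PySem.Str.join, PySem.Chars.join, List.intercalate]

-- the character both programs read at index i
def pvRead (sets : List (List String)) (offsets : List Int) (i : Int) : String :=
  PySem.List.pyGetD (PySem.List.pyGetD sets i []) (PySem.List.pyGetD offsets i 0) ""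

theorem findEnd_ge (sets : List (List String)) :
    ∀ (fuel : Nat) (j : Int), j ≤ pvFindEnd sets fuel j := by
  intro fuel
  induction fuel with
  | zero => intro j; simp only [pvFindEnd]; split <;> exact le_refl j
  | succ f ih =>
    intro j
    simp only [pvFindEnd]
    split
    · exact le_trans (by omega) (ih (j + 1))
    · exact le_refl j

-- B's two passes reconstruct A's recursion: joining the reads over
-- range(idx, pvFindEnd+1) equals A's recursive string.
theorem passes_eq_rec (sets : List (List String)) (offsets : List Int) :
    ∀ (fuel : Nat) (idx : Int),
      PySem.Str.join "" ((PySem.List.pyRange idx (pvFindEnd sets fuel idx + 1) 1).map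
          (pvRead sets offsets)) = convergeRecA sets offsets fuel idx := by
  intro fuel
  induction fuel with
  | zero =>
    intro idx
    simp only [pvFindEnd, convergeRecA]
    split <;>
      rw [PySem.List.pyRange_one_singleton, List.map_singleton, join_empty_singleton] <;> rfl
  | succ f ih =>
    intro idx
    simp only [pvFindEnd, convergeRecA]
    split
    · have h : idx < pvFindEnd sets f (idx + 1) + 1 := by
        have := findEnd_ge sets f (idx + 1); omega
      rw [PySem.List.pyRange_one_cons h, List.map_cons, join_empty_cons, ih (idx + 1)]
      rfl
    · rw [PySem.List.pyRange_one_singleton, List.map_singleton, join_empty_singleton]; rfl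

theorem pvWitness_ok :
    Dom_converge_sets pvWitness_converge_sets.1 pvWitness_converge_sets.2.1
        pvWitness_converge_sets.2.2.1 pvWitness_converge_sets.2.2.2 ∧
      Pre_converge_sets pvWitness_converge_sets.1 pvWitness_converge_sets.2.1
        pvWitness_converge_sets.2.2.1 pvWitness_converge_sets.2.2.2 := by
  decide

-- ===== VERDICT (by name: the statement is the Claim_ definition above) =====
theorem converge_sets_spec : Claim_equal_converge_sets := by
  intro sets idx offsets length _ _
  unfold Spec_converge_sets converge_sets converge_sets_alt
  exact (passes_eq_rec sets offsets ((sets.length : Int) - idx).toNat idx).symm
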